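-- pv_equiv track=rewrite | github.com/Xqyat/Pr5 | main.py | find_negative_columns
-- ===== SOURCE A (Python) =====
-- def find_negative_columns(matrix):
--     n = len(matrix)
--     m = len(matrix[0])
--     negative_columns = []
--     for col in range(m):
--         if all(matrix[row][col] < 0 for row in range(n)):
--             negative_columns.append(col)
--     return negative_columns
-- ===== SOURCE B (Python) =====
-- def find_negative_columns(matrix):
--     m = len(matrix[0])
--     candidates = list(range(m))
--     for row in matrix:
--         candidates = [c for c in candidates if row[c] < 0]
--     return candidates
-- ===== Notes on version B (the rewrite author's own statement) =====
-- stated objective: alternative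
-- what changed: Replaced A's column-outer scan (for each column, test all rows with all()) by a row-outer pass that maintains a shrinking candidate-column list, filtering it by each row in turn.
import Mathlib
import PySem

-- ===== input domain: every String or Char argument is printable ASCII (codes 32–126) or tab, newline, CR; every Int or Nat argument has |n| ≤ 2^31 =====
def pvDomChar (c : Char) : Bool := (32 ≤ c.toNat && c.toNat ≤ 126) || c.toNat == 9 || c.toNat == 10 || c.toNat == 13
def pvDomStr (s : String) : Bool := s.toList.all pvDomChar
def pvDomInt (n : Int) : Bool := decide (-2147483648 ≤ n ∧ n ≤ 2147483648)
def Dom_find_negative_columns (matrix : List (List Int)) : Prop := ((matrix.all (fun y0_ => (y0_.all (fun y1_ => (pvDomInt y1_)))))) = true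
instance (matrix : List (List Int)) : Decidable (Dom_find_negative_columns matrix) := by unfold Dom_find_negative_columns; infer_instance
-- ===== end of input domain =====

-- B replaces A's column-outer all()-scan by a row-outer pass that filters a shrinking candidate list (alternative decomposition, same asymptotic cost).


-- ===== PORT A =====
def find_negative_columns (matrix : List (List Int)) : List Int :=
  let n : Int := PySem.List.len matrix
  let m : Int := PySem.List.len (PySem.List.pyGetD matrix 0 [])
  (PySem.List.pyRange 0 m 1).foldl (fun acc col =>
    if (PySem.List.pyRange 0 n 1).all
        (fun row => decide (PySem.List.pyGetD (PySem.List.pyGetD matrix row []) col 0 < 0))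
    then acc ++ [col] else acc) []

-- ===== PORT B =====
def find_negative_columns_alt (matrix : List (List Int)) : List Int :=
  let m : Int := PySem.List.len (PySem.List.pyGetD matrix 0 [])
  let candidates : List Int := PySem.List.pyRange 0 m 1
  matrix.foldl (fun cands row => cands.filter (fun c => decide (PySem.List.pyGetD row c 0 < 0))) candidates

-- ===== PRECONDITION & SPEC =====
-- Pre_ excludes exactly the inputs on which A raises IndexError: the empty matrix (matrix[0]),
-- and ragged matrices where some column col < len(matrix[0]) stays negative on every row before a
-- row of length ≤ col, so the access matrix[row][col] is out of range (a per-access InRange condition).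
def Pre_find_negative_columns (matrix : List (List Int)) : Prop :=
  matrix ≠ [] ∧ ∀ i < matrix.length, ∀ col < (matrix.headD []).length,
    (∀ j < i, PySem.List.pyGetD (matrix.getD j []) (col : Int) 0 < 0) → col < (matrix.getD i []).length
instance (matrix : List (List Int)) : Decidable (Pre_find_negative_columns matrix) := by
  unfold Pre_find_negative_columns; infer_instance
def pvWitness_find_negative_columns : List (List Int) := [[-1, 2], [-3, -4]]
def Spec_find_negative_columns (matrix : List (List Int)) (out : List Int) : Prop := out = find_negative_columns_alt matrix
instance (matrix : List (List Int)) (out : List Int) : Decidable (Spec_find_negative_columns matrix out) := by unfold Spec_find_negative_columns; infer_instance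

-- ===== CLAIM (what is proved, stated in full; the proofs are below) =====
def Claim_equal_find_negative_columns : Prop := ∀ (matrix : List (List Int)), Dom_find_negative_columns matrix → Pre_find_negative_columns matrix → Spec_find_negative_columns matrix (find_negative_columns matrix)

-- ===== LEMMAS AND PROOFS =====

-- B's loop: repeatedly filtering a candidate list by each row is one filter by "all rows".
theorem foldl_filter_eq_filter_all (p : List Int → Int → Bool)
    (rows : List (List Int)) (xs : List Int) :
    rows.foldl (fun cands row => cands.filter (fun c => p row c)) xs
      = xs.filter (fun c => rows.all (fun row => p row c)) := by
  induction rows generalizing xs with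
  | nil => simp
  | cons r rows ih =>
      simp only [List.foldl_cons, ih, List.filter_filter, List.all_cons]
      exact List.filter_congr (fun c _ => by rw [Bool.and_comm])

-- ===== VERDICT (by name: the statement is the Claim_ definition above) =====
theorem find_negative_columns_spec : Claim_equal_find_negative_columns := by
  intro matrix _ _
  unfold Spec_find_negative_columns find_negative_columns find_negative_columns_alt
  rw [foldl_filter_eq_filter_all, PySem.List.foldl_append_if_eq_filter]
  have h : ∀ col : Int,
      (PySem.List.pyRange 0 (PySem.List.len matrix) 1).all
          (fun row => decide (PySem.List.pyGetD (PySem.List.pyGetD matrix row []) col 0 < 0))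
        = matrix.all (fun row => decide (PySem.List.pyGetD row col 0 < 0)) := by
    intro col
    rw [show (fun row => decide (PySem.List.pyGetD (PySem.List.pyGetD matrix row []) col 0 < 0))
          = ((fun r => decide (PySem.List.pyGetD r col 0 < 0)) ∘ (fun j => PySem.List.pyGetD matrix j [])) from rfl,
        ← List.all_map, PySem.List.map_pyGetD_pyRange_zero]
  simp only [h, List.nil_append]
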